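-- pv_equiv track=rewrite | github.com/Duncans007/imusystem | live_detect/get_hs_frames.py | get_hs_frames
-- ===== SOURCE A (Python) =====
-- def get_hs_frames(gait, perturbation_frame=None):
--
--     # if no perturbation frame is provided, analyze the entire signal
--     if not perturbation_frame:
--         perturbation_frame = len(gait)
--
--     # get a list of frames where heel strike occurs
--     # do not count any heel strikes after the perturbation detection
--     hs_frames = []  # list of frame numbers
--     for i in range(1, perturbation_frame):
--         if gait[i] == 0 and gait[i - 1] != 0:
--             hs_frames.append(i)
--
--     return hs_frames
-- ===== SOURCE B (Python) =====
-- def get_hs_frames(gait, perturbation_frame=None):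
--     # Run-length decomposition: walk runs of equal consecutive values in the
--     # analyzed prefix; a heel strike is the start of each zero-run after index 0.
--     end = len(gait) if not perturbation_frame else max(perturbation_frame, 0)
--     seg = gait[:end]
--     frames = []
--     i = 0
--     n = len(seg)
--     while i < n:
--         j = i + 1
--         while j < n and seg[j] == seg[i]:
--             j += 1
--         if seg[i] == 0 and i >= 1:
--             frames.append(i)
--         i = j
--     return frames
-- ===== Notes on version B (the rewrite author's own statement) =====
-- stated objective: alternative
-- what changed: Replaces the pairwise compare-with-predecessor index scan with a run-length walk over the analyzed prefix that emits the start index of every zero-run past position 0.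
import Mathlib
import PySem

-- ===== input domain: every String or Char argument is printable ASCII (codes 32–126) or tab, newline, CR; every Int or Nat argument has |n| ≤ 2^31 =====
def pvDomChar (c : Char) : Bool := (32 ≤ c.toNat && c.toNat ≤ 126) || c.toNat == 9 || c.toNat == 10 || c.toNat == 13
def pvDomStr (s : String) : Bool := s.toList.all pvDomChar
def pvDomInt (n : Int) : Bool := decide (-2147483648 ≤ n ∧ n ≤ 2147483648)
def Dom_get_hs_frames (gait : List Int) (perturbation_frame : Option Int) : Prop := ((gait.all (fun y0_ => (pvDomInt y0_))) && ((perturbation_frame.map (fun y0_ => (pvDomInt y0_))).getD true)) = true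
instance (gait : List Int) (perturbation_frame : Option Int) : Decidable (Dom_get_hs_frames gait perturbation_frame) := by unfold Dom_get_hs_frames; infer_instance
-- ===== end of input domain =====

-- B replaces A's pairwise compare-with-predecessor scan by a run-length walk over the
-- analyzed prefix (objective: alternative); equivalence is about the return value.

-- ===== PORT A =====
-- A's pairwise index scan over range(1, perturbation_frame); gait[i] is
-- PySem.List.pyGet? with a .getD default that is never used inside Pre_
-- (out-of-range access = IndexError is exactly what Pre_ excludes).
def get_hs_frames (gait : List Int) (perturbation_frame : Option Int) : List Int :=
  let p : Int := match perturbation_frame with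
    | none => (gait.length : Int)
    | some v => if v = 0 then (gait.length : Int) else v   -- `if not perturbation_frame`
  (PySem.List.pyRange 1 p 1).foldl
    (fun acc i =>
      if (PySem.List.pyGet? gait i).getD 1 = 0 ∧ (PySem.List.pyGet? gait (i - 1)).getD 0 ≠ 0
      then acc ++ [i] else acc) []

-- ===== PORT B =====
-- inner `while j < n and seg[j] == seg[i]` = takeWhile/dropWhile on the rest of the run
def bRuns (xs : List Int) (i : Int) : List Int :=
  match xs with
  | [] => []
  | x :: rest =>
      let run := rest.takeWhile (fun y => y = x)
      let rest' := rest.dropWhile (fun y => y = x)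
      (if x = 0 ∧ 1 ≤ i then [i] else []) ++ bRuns rest' (i + 1 + run.length)
termination_by xs.length
decreasing_by
  simpa using Nat.lt_succ_of_le (List.length_dropWhile_le (p := fun y => decide (y = x)) (l := rest))

def get_hs_frames_alt (gait : List Int) (perturbation_frame : Option Int) : List Int :=
  let e : Int := match perturbation_frame with
    | none => (gait.length : Int)
    | some v => if v = 0 then (gait.length : Int) else max v 0
  bRuns (gait.take e.toNat) 0   -- gait[:e] with e ≥ 0 is exactly take e.toNat

-- ===== PRECONDITION & SPEC =====
-- Pre_ excludes exactly the inputs where A raises IndexError: an explicit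
-- perturbation_frame larger than the list (with at least one loop iteration).
def Pre_get_hs_frames (gait : List Int) (perturbation_frame : Option Int) : Prop :=
  perturbation_frame.all (fun v => decide (v ≤ (gait.length : Int) ∨ v ≤ 1)) = true

instance (gait : List Int) (perturbation_frame : Option Int) : Decidable (Pre_get_hs_frames gait perturbation_frame) := by unfold Pre_get_hs_frames; infer_instance

def pvWitness_get_hs_frames : List Int × Option Int := ([1, 0, 2, 0, 0], none)

def Spec_get_hs_frames (gait : List Int) (perturbation_frame : Option Int) (out : List Int) : Prop := out = get_hs_frames_alt gait perturbation_frame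
instance (gait : List Int) (perturbation_frame : Option Int) (out : List Int) : Decidable (Spec_get_hs_frames gait perturbation_frame out) := by unfold Spec_get_hs_frames; infer_instance

-- ===== CLAIM (what is proved, stated in full; the proofs are below) =====
def Claim_equal_get_hs_frames : Prop := ∀ (gait : List Int) (perturbation_frame : Option Int), Dom_get_hs_frames gait perturbation_frame → Pre_get_hs_frames gait perturbation_frame → Spec_get_hs_frames gait perturbation_frame (get_hs_frames gait perturbation_frame)

-- ===== LEMMAS AND PROOFS =====

-- common reference form: emit index i whenever current = 0 and previous ≠ 0
def pairScan (prev : Int) (xs : List Int) (i : Int) : List Int :=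
  match xs with
  | [] => []
  | x :: rest => (if x = 0 ∧ prev ≠ 0 then [i] else []) ++ pairScan x rest (i + 1)

theorem pairScan_run (x : Int) (run rest : List Int) (h : ∀ y ∈ run, y = x) (i : Int) :
    pairScan x (run ++ rest) i = pairScan x rest (i + run.length) := by
  induction run generalizing i with
  | nil => simp [pairScan]
  | cons y ys ih =>
      have hy : y = x := h y (by simp)
      subst hy
      have : ¬ (y = 0 ∧ y ≠ 0) := by tauto
      simp only [List.cons_append, pairScan, if_neg this, List.nil_append]
      rw [ih (fun z hz => h z (by simp [hz]))]
      congr 1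
      simp only [List.length_cons]
      push_cast
      ring

theorem bRuns_eq_pairScan (n : Nat) (xs : List Int) (hn : xs.length ≤ n) (prev i : Int)
    (hi : 1 ≤ i) (hhd : ∀ h, xs.head? = some h → prev ≠ h) :
    bRuns xs i = pairScan prev xs i := by
  induction n generalizing xs prev i with
  | zero =>
      have : xs = [] := List.eq_nil_of_length_eq_zero (by omega)
      subst this; simp [bRuns, pairScan]
  | succ n ih =>
      cases xs with
      | nil => simp [bRuns]; rfl
      | cons x rest =>
          have hpx : prev ≠ x := hhd x rfl
          have hall : ∀ y ∈ rest.takeWhile (fun y => decide (y = x)), y = x := by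
            intro y hy
            simpa using List.mem_takeWhile_imp hy
          rw [bRuns,
            show pairScan prev (x :: rest) i
              = (if x = 0 ∧ prev ≠ 0 then [i] else []) ++ pairScan x rest (i + 1) from rfl]
          conv_rhs => rw [← List.takeWhile_append_dropWhile (p := fun y => decide (y = x)) (l := rest)]
          rw [pairScan_run x _ _ hall]
          congr 1
          · by_cases hx : x = 0
            · have hprev0 : prev ≠ 0 := by rw [hx] at hpx; exact hpx
              simp [hx, hi, hprev0]
            · simp [hx]
          · have hlen2 : (rest.dropWhile (fun y => decide (y = x))).length ≤ n := by
              have := List.length_dropWhile_le (fun y => decide (y = x)) rest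
              simp only [List.length_cons] at hn
              omega
            rw [ih _ hlen2 x _ (by omega)]
            intro h hh hxh
            have hw := List.head?_dropWhile_not (fun y => decide (y = x)) rest
            rw [hh] at hw
            simp only [decide_eq_false_iff_not] at hw
            exact hw hxh.symm

-- A's filtered range over gait[1:p] equals pairScan on the materialized window.
theorem filter_range_eq_pairScan (gait : List Int) (t rest : List Int) (prev : Int) (i : Int)
    (hi : 1 ≤ i) (hdrop : gait.drop (i - 1).toNat = prev :: rest) (htake : rest.take t.length = t) :
    (PySem.List.pyRange i (i + t.length) 1).filter
      (fun j => decide ((PySem.List.pyGet? gait j).getD 1 = 0 ∧ (PySem.List.pyGet? gait (j - 1)).getD 0 ≠ 0))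
      = pairScan prev t i := by
  induction t generalizing prev rest i with
  | nil =>
      simp [PySem.List.pyRange_one_eq_nil, pairScan]
  | cons x xs ih =>
      cases rest with
      | nil => simp at htake
      | cons r rest2 =>
          simp only [List.length_cons, List.take_succ_cons, List.cons.injEq] at htake
          obtain ⟨hrx, htake2⟩ := htake
          subst hrx
          have hget_prev : gait[(i - 1).toNat]? = some prev := by
            have h0 : (gait.drop (i - 1).toNat)[0]? = some prev := by rw [hdrop]; rfl
            simpa [List.getElem?_drop] using h0
          have hget_r : gait[i.toNat]? = some r := by
            have h1 : (gait.drop (i - 1).toNat)[1]? = some r := by rw [hdrop]; rfl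
            rw [List.getElem?_drop] at h1
            rw [← h1]; congr 1; omega
          have hpg_r : PySem.List.pyGet? gait i = some r := by
            rw [PySem.List.pyGet?_of_nonneg gait (by omega)]; exact hget_r
          have hpg_prev : PySem.List.pyGet? gait (i - 1) = some prev := by
            rw [PySem.List.pyGet?_of_nonneg gait (by omega)]
            exact hget_prev
          have hdrop' : gait.drop ((i + 1) - 1).toNat = r :: rest2 := by
            have h1 : ((i + 1) - 1).toNat = (i - 1).toNat + 1 := by omega
            rw [h1, ← List.drop_drop, hdrop]
            rfl
          have hrange : PySem.List.pyRange i (i + (↑(r :: xs).length)) 1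
              = i :: PySem.List.pyRange (i + 1) ((i + 1) + (xs.length : Int)) 1 := by
            have h2 : i + ((r :: xs).length : Int) = (i + 1) + (xs.length : Int) := by
              simp only [List.length_cons]; push_cast; ring
            rw [h2, PySem.List.pyRange_one_cons (by simp only [List.length_cons] at *; omega)]
          rw [hrange, List.filter_cons,
            show pairScan prev (r :: xs) i
              = (if r = 0 ∧ prev ≠ 0 then [i] else []) ++ pairScan r xs (i + 1) from rfl]
          rw [ih rest2 r (i + 1) (by omega) hdrop' htake2]
          simp only [hpg_r, hpg_prev, Option.getD_some]
          by_cases hc : r = 0 ∧ prev ≠ 0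
          · simp [hc]
          · simp [hc]

-- top-level reduction of A to a filtered range
theorem get_hs_frames_filter (gait : List Int) (p : Int) :
    (PySem.List.pyRange 1 p 1).foldl
      (fun acc i =>
        if (PySem.List.pyGet? gait i).getD 1 = 0 ∧ (PySem.List.pyGet? gait (i - 1)).getD 0 ≠ 0
        then acc ++ [i] else acc) []
    = (PySem.List.pyRange 1 p 1).filter
        (fun j => decide ((PySem.List.pyGet? gait j).getD 1 = 0 ∧ (PySem.List.pyGet? gait (j - 1)).getD 0 ≠ 0)) := by
  rw [PySem.List.foldl_append_ite_eq_filter]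
  simp

-- B's run walk started at index 0 never emits index 0 and then agrees with pairScan
theorem bRuns_cons_eq_pairScan (h : Int) (t : List Int) : bRuns (h :: t) 0 = pairScan h t 1 := by
  have hall : ∀ y ∈ t.takeWhile (fun y => decide (y = h)), y = h := by
    intro y hy
    simpa using List.mem_takeWhile_imp hy
  rw [bRuns]
  rw [if_neg (by omega : ¬ (h = 0 ∧ (1:Int) ≤ 0)), List.nil_append]
  conv_rhs => rw [← List.takeWhile_append_dropWhile (p := fun y => decide (y = h)) (l := t)]
  rw [pairScan_run h _ _ hall]
  have hidx : (0 : Int) + 1 + ((t.takeWhile (fun y => decide (y = h))).length : Int)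
      = 1 + ((t.takeWhile (fun y => decide (y = h))).length : Int) := by omega
  rw [hidx]
  apply bRuns_eq_pairScan (t.dropWhile (fun y => decide (y = h))).length _ le_rfl h _ (by omega)
  intro z hz hzh
  have hw := List.head?_dropWhile_not (fun y => decide (y = h)) t
  rw [hz] at hw
  simp only [decide_eq_false_iff_not] at hw
  exact hw hzh.symm

-- unified core: A's scan bounded by p equals B's run walk on the clamped prefix
theorem core_eq (gait : List Int) (p : Int) (hp : p ≤ (gait.length : Int) ∨ p ≤ 1) :
    (PySem.List.pyRange 1 p 1).filter
      (fun j => decide ((PySem.List.pyGet? gait j).getD 1 = 0 ∧ (PySem.List.pyGet? gait (j - 1)).getD 0 ≠ 0))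
    = bRuns (gait.take (max p 0).toNat) 0 := by
  by_cases hp1 : p ≤ 1
  · -- at most one frame in window: both sides empty
    rw [PySem.List.pyRange_one_eq_nil hp1]
    cases hseg : gait.take (max p 0).toNat with
    | nil => simp [bRuns]
    | cons x rest =>
        have h1 : (gait.take (max p 0).toNat).length ≤ 1 :=
          le_trans (List.length_take_le (max p 0).toNat gait) (by omega)
        rw [hseg] at h1
        simp only [List.length_cons] at h1
        have : rest = [] := List.eq_nil_of_length_eq_zero (by omega)
        subst this
        simp [bRuns]
  · have hple : p ≤ (gait.length : Int) := by tauto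
    cases gait with
    | nil => simp only [List.length_nil, Int.natCast_zero] at hple; omega
    | cons h t =>
        have hmax : (max p 0).toNat = p.toNat := by omega
        rw [hmax]
        have hw : (h :: t).take p.toNat = h :: t.take (p.toNat - 1) := by
          have : p.toNat = (p.toNat - 1) + 1 := by omega
          rw [this]; rfl
        rw [hw, bRuns_cons_eq_pairScan]
        have hlen : (t.take (p.toNat - 1)).length = p.toNat - 1 := by
          rw [List.length_take]
          simp only [List.length_cons] at hple
          omega
        have hA := filter_range_eq_pairScan (h :: t) (t.take (p.toNat - 1)) t h 1 (by omega)
          (by simp) (by rw [hlen])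
        have hend : (1 : Int) + ((t.take (p.toNat - 1)).length : Int) = p := by
          rw [hlen]
          simp only [List.length_cons] at hple
          omega
        rw [hend] at hA
        exact hA

-- ===== VERDICT (by name: the statement is the Claim_ definition above) =====
theorem get_hs_frames_spec : Claim_equal_get_hs_frames := by
  intro gait pf _hdom hpre
  unfold Spec_get_hs_frames get_hs_frames get_hs_frames_alt
  cases pf with
  | none =>
      dsimp only
      rw [get_hs_frames_filter, core_eq gait (gait.length : Int) (Or.inl le_rfl)]
      have : (max ((gait.length : Int)) 0).toNat = ((gait.length : Int)).toNat := by omega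
      rw [this]
  | some v =>
      unfold Pre_get_hs_frames at hpre
      simp only [Option.all_some, decide_eq_true_eq] at hpre
      by_cases hv : v = 0
      · subst hv
        dsimp only
        rw [if_pos rfl, if_pos rfl]
        rw [get_hs_frames_filter, core_eq gait (gait.length : Int) (Or.inl le_rfl)]
        have : (max ((gait.length : Int)) 0).toNat = ((gait.length : Int)).toNat := by omega
        rw [this]
      · dsimp only
        rw [if_neg hv, if_neg hv]
        rw [get_hs_frames_filter, core_eq gait v hpre]
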